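-- pv_equiv track=rewrite | github.com/penkin/Advent-of-Code | 2020/day-03/trees.py | get_map_data_character
-- ===== SOURCE A (Python) =====
-- def get_map_data_character(map_data: list, x: int, y: int) -> str:
--     """
--     Gets the character found in the map data at the given x and y positions. Since the
--     map tiles, if we get an index error on the x value, we can simply tile the line and
--     try again.
--     :param map_data:
--     :param x:
--     :param y:
--     :return:
--     """
--     line = map_data[y]
--
--     try:
--         character = line[x]
--         return character
--     except IndexError:
--         map_data[y] = map_data[y] * 2
--         return get_map_data_character(map_data, x, y)
-- ===== SOURCE B (Python) =====
-- def get_map_data_character(map_data: list, x: int, y: int) -> str: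
--     # Direct modular index into the original line (no doubling, no mutation of map_data);
--     # same return value as A wherever A returns.
--     line = map_data[y]
--     return line[x % len(line)]
-- ===== Notes on version B (the rewrite author's own statement) =====
-- stated objective: simpler
-- what changed: Replaces A's recursive try/except loop that repeatedly doubles map_data[y] in place with a single modular index line[x % len(line)] into the original line (no recursion, no mutation).
import Mathlib
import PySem

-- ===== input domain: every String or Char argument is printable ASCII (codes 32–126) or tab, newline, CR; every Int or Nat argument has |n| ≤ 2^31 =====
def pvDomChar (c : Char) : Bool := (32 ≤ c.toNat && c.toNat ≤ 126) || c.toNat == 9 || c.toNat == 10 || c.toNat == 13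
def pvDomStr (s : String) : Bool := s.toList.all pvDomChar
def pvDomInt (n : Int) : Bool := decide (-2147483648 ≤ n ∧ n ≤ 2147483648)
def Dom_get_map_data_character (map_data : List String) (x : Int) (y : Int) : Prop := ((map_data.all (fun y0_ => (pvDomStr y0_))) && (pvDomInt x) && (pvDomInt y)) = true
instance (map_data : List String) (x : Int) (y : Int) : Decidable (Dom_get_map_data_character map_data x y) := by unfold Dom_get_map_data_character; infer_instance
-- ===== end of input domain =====

-- B replaces A's recursive try/except line-doubling by one modular index into the original line;
-- the equivalence proved is about the RETURN value only (A also mutates map_data[y] in place by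
-- doubling it, which B does not).

-- ===== PORT A =====
-- the try/except recursion: line[x]; on IndexError, double the line and retry.
-- fuel 34 is a totality guard only: under Pre_ and Dom (|x| ≤ 2^31, line nonempty)
-- the doubling succeeds well within 34 rounds, so the fuel is never exhausted there.
def getA_aux : Nat → List Char → Int → String
  | 0, _, _ => ""
  | n + 1, cs, x =>
      match PySem.List.pyGet? cs x with
      | some c => String.ofList [c]
      | none => getA_aux n (cs ++ cs) x

def get_map_data_character (map_data : List String) (x : Int) (y : Int) : String :=
  match PySem.List.pyGet? map_data y with
  | none => ""            -- IndexError on map_data[y]: excluded by Pre_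
  | some line => getA_aux 34 line.toList x

-- ===== PORT B =====
def get_map_data_character_alt (map_data : List String) (x : Int) (y : Int) : String :=
  match PySem.List.pyGet? map_data y with
  | none => ""            -- IndexError on map_data[y]: excluded by Pre_
  | some line =>
      match PySem.List.pyGet? line.toList (PySem.Int.mod x (line.toList.length : Int)) with
      | some c => String.ofList [c]
      | none => ""        -- only on an empty line (x % 0 raises ZeroDivisionError): excluded by Pre_

-- ===== PRECONDITION & SPEC =====
-- Pre_ excludes exactly the inputs where A raises: y out of range (IndexError in both A and B)
-- and an empty selected line (A recurses without progress, RecursionError; B raises ZeroDivisionError).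
def Pre_get_map_data_character (map_data : List String) (x : Int) (y : Int) : Prop :=
  (PySem.List.pyGet? map_data y).getD "" ≠ ""
instance (map_data : List String) (x : Int) (y : Int) : Decidable (Pre_get_map_data_character map_data x y) := by unfold Pre_get_map_data_character; infer_instance

def pvWitness_get_map_data_character : List String × Int × Int := (["..#.", "#..."], 9, 1)

def Spec_get_map_data_character (map_data : List String) (x : Int) (y : Int) (out : String) : Prop := out = get_map_data_character_alt map_data x y
instance (map_data : List String) (x : Int) (y : Int) (out : String) : Decidable (Spec_get_map_data_character map_data x y out) := by unfold Spec_get_map_data_character; infer_instance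

-- ===== CLAIM (what is proved, stated in full; the proofs are below) =====
def Claim_equal_get_map_data_character : Prop := ∀ (map_data : List String) (x : Int) (y : Int), Dom_get_map_data_character map_data x y → Pre_get_map_data_character map_data x y → Spec_get_map_data_character map_data x y (get_map_data_character map_data x y)

-- ===== LEMMAS AND PROOFS =====

-- a successful direct index line[x] yields the modular character
lemma pyGet?_eq_mod_getD (cs : List Char) (x : Int) (c : Char)
    (h : PySem.List.pyGet? cs x = some c) :
    c = cs.getD ((x % (cs.length : Int))).toNat ' ' := by
  have hin : PySem.Raise.InRange cs.length x := by
    by_contra hn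
    rw [(PySem.List.pyGet?_eq_none_iff cs x).mpr hn] at h
    simp at h
  unfold PySem.Raise.InRange at hin
  by_cases hx : 0 ≤ x
  · rw [PySem.List.pyGet?_of_nonneg cs hx] at h
    have hlt : x.toNat < cs.length := by omega
    have hemod : (x % (cs.length : Int)) = x := Int.emod_eq_of_lt hx (by omega)
    rw [hemod]
    rw [List.getElem?_eq_getElem hlt] at h
    simp only [Option.some.injEq] at h
    rw [List.getD_eq_getElem cs ' ' hlt]
    exact h.symm
  · have hk : x = -(((-x).toNat : Nat) : Int) := by omega
    rw [hk, PySem.List.pyGet?_neg_natCast cs (-x).toNat (by omega) (by omega)] at h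
    have hlt : cs.length - (-x).toNat < cs.length := by omega
    rw [List.getElem?_eq_getElem hlt] at h
    simp only [Option.some.injEq] at h
    have hemod0 : (x % (cs.length : Int)) = x + cs.length := by
      have h0 : (x + cs.length) % (cs.length : Int) = (x % (cs.length : Int)) := by
        conv_lhs => rw [show x + (cs.length : Int) = x + (cs.length : Int) * 1 by ring]
        exact Int.add_mul_emod_self_left x (cs.length : Int) 1
      rw [← h0]
      exact Int.emod_eq_of_lt (by omega) (by omega)
    have hemod : ((x % (cs.length : Int))).toNat = cs.length - (-x).toNat := by omega
    rw [hemod, List.getD_eq_getElem cs ' ' hlt]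
    exact h.symm

-- the modular character is unchanged by doubling the line
lemma mod_getD_double (cs : List Char) (x : Int) (h : cs ≠ []) :
    (cs ++ cs).getD ((x % ((cs ++ cs).length : Int))).toNat ' '
      = cs.getD ((x % (cs.length : Int))).toNat ' ' := by
  have hL : 0 < cs.length := List.length_pos_iff.mpr h
  have hlen2 : (cs ++ cs).length = cs.length + cs.length := by simp
  have hdvd : (cs.length : Int) ∣ ((cs ++ cs).length : Int) := by
    rw [hlen2]; exact ⟨2, by push_cast; ring⟩
  have hmm : (x % ((cs ++ cs).length : Int)) % (cs.length : Int)
      = (x % (cs.length : Int)) := Int.emod_emod_of_dvd x hdvd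
  have hb1 : 0 ≤ (x % ((cs ++ cs).length : Int)) := Int.emod_nonneg x (by omega)
  have hb2 : (x % ((cs ++ cs).length : Int)) < ((cs ++ cs).length : Int) :=
    Int.emod_lt_of_pos x (by omega)
  set i2 : Nat := ((x % ((cs ++ cs).length : Int))).toNat with hi2
  have hi2lt : i2 < cs.length + cs.length := by omega
  have key : (x % (cs.length : Int)) = ((i2 : Int) % (cs.length : Int)) := by
    rw [← hmm]; congr 1; omega
  rw [List.getD_eq_getElem (cs ++ cs) ' ' (by omega : i2 < (cs ++ cs).length)]
  by_cases hc : i2 < cs.length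
  · have h1 : ((x % (cs.length : Int))).toNat = i2 := by
      have e := Int.emod_eq_of_lt (a := (i2 : Int)) (b := (cs.length : Int)) (by omega) (by omega)
      rw [key]; omega
    rw [h1, List.getElem_append_left hc, List.getD_eq_getElem cs ' ' hc]
  · have hIL : ((i2 : Int) % (cs.length : Int)) = (i2 : Int) - cs.length := by
      have e2 := Int.add_mul_emod_self_left ((i2 : Int) - cs.length) (cs.length : Int) 1
      have e3 := Int.emod_eq_of_lt (a := (i2 : Int) - cs.length) (b := (cs.length : Int)) (by omega) (by omega)
      calc ((i2 : Int) % (cs.length : Int))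
        = ((i2 : Int) - cs.length + (cs.length : Int) * 1) % (cs.length : Int) := by ring_nf
      _ = ((i2 : Int) - cs.length) % (cs.length : Int) := e2
      _ = (i2 : Int) - cs.length := e3
    have h1 : ((x % (cs.length : Int))).toNat = i2 - cs.length := by
      rw [key, hIL]; omega
    rw [h1, List.getElem_append_right (by omega),
        List.getD_eq_getElem cs ' ' (by omega : i2 - cs.length < cs.length)]

-- the doubling loop, given enough fuel, computes the modular character
lemma getA_aux_eq (n : Nat) : ∀ (cs : List Char) (x : Int), cs ≠ [] →
    -(2 ^ n * (cs.length : Int)) ≤ x → x < 2 ^ n * (cs.length : Int) →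
    getA_aux (n + 1) cs x = String.ofList [cs.getD ((x % (cs.length : Int))).toNat ' '] := by
  induction n with
  | zero =>
    intro cs x h hlo hhi
    simp only [pow_zero, one_mul] at hlo hhi
    have hin : PySem.Raise.InRange cs.length x := by
      unfold PySem.Raise.InRange; omega
    simp only [getA_aux]
    cases hg : PySem.List.pyGet? cs x with
    | none => exact absurd ((PySem.List.pyGet?_eq_none_iff cs x).mp hg) (by simp [hin])
    | some c => rw [← pyGet?_eq_mod_getD cs x c hg]
  | succ n ih =>
    intro cs x h hlo hhi
    rw [getA_aux]
    cases hg : PySem.List.pyGet? cs x with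
    | some c => rw [← pyGet?_eq_mod_getD cs x c hg]
    | none =>
      have h2 : (cs ++ cs) ≠ [] := by simp [h]
      have hlen : ((cs ++ cs).length : Int) = 2 * cs.length := by simp; ring
      have hb1 : -(2 ^ n * ((cs ++ cs).length : Int)) ≤ x := by
        rw [hlen]; rw [pow_succ] at hlo; linarith
      have hb2 : x < 2 ^ n * ((cs ++ cs).length : Int) := by
        rw [hlen]; rw [pow_succ] at hhi; linarith
      have e := ih (cs ++ cs) x h2 hb1 hb2
      rw [e, mod_getD_double cs x h]

-- ===== VERDICT (by name: the statement is the Claim_ definition above) =====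
theorem get_map_data_character_spec : Claim_equal_get_map_data_character := by
  intro map_data x y hDom hPre
  unfold Spec_get_map_data_character
  have hx : -2147483648 ≤ x ∧ x ≤ 2147483648 := by
    simp [Dom_get_map_data_character, pvDomInt] at hDom; tauto
  unfold Pre_get_map_data_character at hPre
  unfold get_map_data_character get_map_data_character_alt
  cases hg : PySem.List.pyGet? map_data y with
  | none => rw [hg] at hPre
  | some line =>
    rw [hg] at hPre
    simp only [Option.getD_some] at hPre
    dsimp only
    have hcs : line.toList ≠ [] := by
      intro hnil
      exact hPre (String.toList_inj.mp (by simp [hnil]))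
    have hL : 0 < line.toList.length := List.length_pos_iff.mpr hcs
    have hL1 : (1 : Int) ≤ (line.toList.length : Int) := by exact_mod_cast hL
    have hbig : (2147483649 : Int) ≤ 2 ^ 33 * (line.toList.length : Int) := by
      nlinarith
    have e1 := getA_aux_eq 33 line.toList x hcs (by linarith [hx.1]) (by linarith [hx.2])
    rw [show (34 : Nat) = 33 + 1 from rfl, e1]
    have hmod : PySem.Int.mod x (line.toList.length : Int) = x % (line.toList.length : Int) :=
      PySem.Int.mod_eq_emod_of_pos (by omega)
    have hnn : 0 ≤ x % (line.toList.length : Int) := Int.emod_nonneg x (by omega)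
    have hltN : (x % (line.toList.length : Int)).toNat < line.toList.length := by
      have := Int.emod_lt_of_pos x (b := (line.toList.length : Int)) (by omega)
      omega
    rw [hmod, PySem.List.pyGet?_of_nonneg line.toList hnn,
        List.getElem?_eq_getElem hltN, List.getD_eq_getElem line.toList ' ' hltN]
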